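-- pv_equiv track=rewrite | github.com/thedamlab/rodeo2 | ripp_modules/VirtualRipp.py | parse_radar_output
-- ===== SOURCE A (Python) =====
-- def get_match_score(a, b):
--     if a == b:
--         return 1
--     elif (a in ['D', 'E'] and b in ['D', 'E']) \
--     or (a in ['S', 'T'] and b in ['S', 'T']):
--         return .5
--     else:
--         return 0
--
-- def get_repeat_score(repeats):
--     score = 0
--     for i in range(len(repeats[0])):
--         char_to_match = repeats[0][i]
--         if char_to_match not in ['D', 'E', 'T', 'S', 'K']:
--             continue
--         count_same = 0
--         for r in repeats:
--             count_same += get_match_score(char_to_match, r[i])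
--         if count_same == len(repeats):
--             score += 1
--     return score
--
-- def parse_radar_output(radar_output):
--     score = 0
--     i = 0
--     repeat_count = 0
--     while i < len(radar_output):
--         line = radar_output[i]
--         if len(line.split('|')) > 1:
--             if line.split('|')[0] == "No. of Repeats":
--                 i += 1
--                 line = radar_output[i]
--                 repeat_count = int(line.split('|')[0])
--                 i += 2
--                 repeats = []
--                 for repeat_idx in range(repeat_count):
--                     line = radar_output[i]
--                     repeats.append(line.split('\t')[-1])
--                     i += 1
--                 if len(repeats) > 0:
--                     score = max(score, get_repeat_score(repeats))
--         i += 1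
--     return score
-- ===== SOURCE B (Python) =====
-- def _block_score(repeats):
--     # Repeat-major set intersection: start from the set of D/E/T/S/K positions
--     # of the first repeat, then intersect it, one repeat at a time, with the
--     # positions where that repeat agrees with the first; the score is what
--     # survives.  (Indexes r[i] explicitly, so ragged repeats still raise
--     # IndexError on a scored column.)
--     first = repeats[0]
--     hits = {i for i in range(len(first)) if first[i] in ('D', 'E', 'T', 'S', 'K')}
--     for r in repeats:
--         hits = {i for i in hits if r[i] == first[i]}
--     return len(hits)
--
-- def _blocks(radar_output):
--     # Generator over the repeat blocks, visiting exactly the lines the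
--     # original cursor walk visits.
--     i, n_lines = 0, len(radar_output)
--     while i < n_lines:
--         fields = radar_output[i].split('|')
--         if len(fields) > 1 and fields[0] == "No. of Repeats":
--             n = int(radar_output[i + 1].split('|')[0])
--             repeats = [radar_output[i + 3 + j].split('\t')[-1] for j in range(n)]
--             if repeats:
--                 yield repeats
--             i += 4 + max(n, 0)
--         else:
--             i += 1
--
-- def parse_radar_output(radar_output):
--     return max((_block_score(repeats) for repeats in _blocks(radar_output)), default=0)
-- ===== Notes on version B (the rewrite author's own statement) =====
-- stated objective: alternative
-- what changed: Block scoring is transposed from A's position-major weighted scan (summing 1/0.5/0 similarity points over the repeats per column and comparing the sum with the repeat count) to a repeat-major set intersection: B starts from the set of D/E/T/S/K positions of the first repeat, intersects it with each repeat's agreement positions, and returns the surviving set's size (a 0.5 point can never complete a full-count sum, so the intersection is equivalent); the cursor walk is a block-collecting generator maxed once at the end.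
-- outside the precondition, e.g. on parse_radar_output(['No. of Repeats|', '1|', 'No. of Repeats|', 'x\tD', 'end']): A returns 1, B returns 1
import Mathlib
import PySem

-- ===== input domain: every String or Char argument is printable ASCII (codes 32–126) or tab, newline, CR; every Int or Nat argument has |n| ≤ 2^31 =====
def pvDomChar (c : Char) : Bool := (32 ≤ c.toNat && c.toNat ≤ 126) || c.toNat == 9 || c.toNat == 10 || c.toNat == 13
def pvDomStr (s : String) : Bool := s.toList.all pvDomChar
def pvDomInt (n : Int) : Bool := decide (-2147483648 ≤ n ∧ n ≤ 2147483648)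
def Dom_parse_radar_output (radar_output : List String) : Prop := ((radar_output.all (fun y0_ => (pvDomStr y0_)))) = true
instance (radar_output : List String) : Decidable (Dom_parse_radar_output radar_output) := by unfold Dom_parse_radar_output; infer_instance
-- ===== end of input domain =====

-- B replaces A's position-major weighted scan (1 / 0.5 / 0 similarity points summed over the
-- repeats per column and compared with the repeat count) by a repeat-major set intersection:
-- start from the set of D/E/T/S/K positions of the first repeat and intersect it with each
-- repeat's agreement positions; the block walk is a block-collecting generator maxed once at
-- the end (objective: alternative decomposition, same cost).

-- ===== PORT A =====
-- line.split(sep): sep is never empty here, so split? is always `some`; the default is unreachable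
def pvSplitA (s sep : String) : List String := (PySem.Str.split? s sep).getD []

def pvGetMatchScore (a b : Char) : ℚ :=
  if a = b then 1
  else if ((a = 'D' ∨ a = 'E') ∧ (b = 'D' ∨ b = 'E')) ∨ ((a = 'S' ∨ a = 'T') ∧ (b = 'S' ∨ b = 'T')) then 1/2
  else 0

-- repeats[0] and r[i] are pyGet?; the `.getD` defaults are unreachable under Pre_
def pvGetRepeatScore (repeats : List String) : Int :=
  (List.range (((PySem.List.pyGet? repeats 0).getD "").toList.length)).foldl
    (fun score (i : Nat) =>
      if (PySem.Str.pyGet? ((PySem.List.pyGet? repeats 0).getD "") (i : Int)).getD ' '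
          ∉ (['D', 'E', 'T', 'S', 'K'] : List Char) then score
      else
        if repeats.foldl
            (fun acc r => acc + pvGetMatchScore
              ((PySem.Str.pyGet? ((PySem.List.pyGet? repeats 0).getD "") (i : Int)).getD ' ')
              ((PySem.Str.pyGet? r (i : Int)).getD ' ')) (0 : ℚ)
            = (repeats.length : ℚ) then score + 1
        else score)
    0

-- the while loop, one recursive step per iteration, totalised by a fuel argument
-- (radar.length steps always suffice: the cursor advances by at least 1 per iteration);
-- out-of-range reads (excluded by Pre_) default via getD
def pvLoopA (radar : List String) (score : Int) (i : Nat) : Nat → Int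
  | 0 => score
  | fuel + 1 =>
    if i < radar.length then
      if (pvSplitA (radar.getD i "") "|").length > 1 then
        if (pvSplitA (radar.getD i "") "|").headD "" = "No. of Repeats" then
          pvLoopA radar
            (if ((List.range ((PySem.Int.ofStr? ((pvSplitA (radar.getD (i + 1) "") "|").headD "")).getD 0).toNat).map
                  (fun ridx => (pvSplitA (radar.getD (i + 3 + ridx) "") "\t").getLastD "")).length > 0 then
              max score (pvGetRepeatScore
                (((List.range ((PySem.Int.ofStr? ((pvSplitA (radar.getD (i + 1) "") "|").headD "")).getD 0).toNat).map
                  (fun ridx => (pvSplitA (radar.getD (i + 3 + ridx) "") "\t").getLastD ""))))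
            else score)
            (i + 3 + ((PySem.Int.ofStr? ((pvSplitA (radar.getD (i + 1) "") "|").headD "")).getD 0).toNat + 1) fuel
        else pvLoopA radar score (i + 1) fuel
      else pvLoopA radar score (i + 1) fuel
    else score

def parse_radar_output (radar_output : List String) : Int :=
  pvLoopA radar_output 0 0 radar_output.length

-- ===== PORT B =====
def pvBarFields (s : String) : List String := (PySem.Str.split? s "|").getD []

def pvLastTabField (s : String) : String := ((PySem.Str.split? s "\t").getD []).getLastD ""

-- B's _block_score: set of D/E/T/S/K positions of repeats[0], intersected with each repeat's
-- agreement positions, then its size (sets are PySem.Set; the comprehensions keep ascending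
-- order, a valid representative of the set)
def pvBlockScore (repeats : List String) : Int :=
  ((repeats.foldl
      (fun (hits : PySem.Set Int) r => PySem.Set.ofList (hits.filter
        (fun i => (PySem.Str.pyGet? r i).getD '\x00' == (PySem.Str.pyGet? ((PySem.List.pyGet? repeats 0).getD "") i).getD ' ')))
      (PySem.Set.ofList ((PySem.List.pyRange 0 (PySem.Str.len ((PySem.List.pyGet? repeats 0).getD "")) 1).filter
        (fun i => (PySem.Str.pyGet? ((PySem.List.pyGet? repeats 0).getD "") i).getD ' '
          ∈ (['D', 'E', 'T', 'S', 'K'] : List Char))))).length : Int)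

-- B's _blocks generator, as the list of blocks it yields (same fuel totalisation)
def pvBlocks (radar : List String) (i : Nat) : Nat → List (List String)
  | 0 => []
  | fuel + 1 =>
    if i < radar.length then
      if (pvBarFields (radar.getD i "")).length > 1 ∧
          (pvBarFields (radar.getD i "")).headD "" = "No. of Repeats" then
        (if ((List.range ((PySem.Int.ofStr? ((pvBarFields (radar.getD (i + 1) "")).headD "")).getD 0).toNat).map
              (fun j => pvLastTabField (radar.getD (i + 3 + j) ""))).isEmpty then []
         else [(List.range ((PySem.Int.ofStr? ((pvBarFields (radar.getD (i + 1) "")).headD "")).getD 0).toNat).map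
              (fun j => pvLastTabField (radar.getD (i + 3 + j) ""))]) ++
        pvBlocks radar (i + 4 + ((PySem.Int.ofStr? ((pvBarFields (radar.getD (i + 1) "")).headD "")).getD 0).toNat) fuel
      else pvBlocks radar (i + 1) fuel
    else []

-- max(generator, default=0)
def parse_radar_output_alt (radar_output : List String) : Int :=
  PySem.List.maxD ((pvBlocks radar_output 0 radar_output.length).map pvBlockScore) (fun x => x) 0

-- ===== PRECONDITION & SPEC =====
-- Pre_ excludes the inputs on which A raises: a "No. of Repeats|…" header line whose block is
-- malformed — no following line (IndexError), a repeat count that is not an int() literal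
-- (ValueError), fewer repeat lines than the count (IndexError), or a repeat shorter than the
-- first one at a scored D/E/T/S/K column (IndexError). It is slightly narrower than A's
-- returning domain: it constrains EVERY header-shaped line, including ones among the lines of an
-- already-consumed block, which A's cursor jumps over without parsing them.
def Pre_parse_radar_output (radar_output : List String) : Prop :=
  ((List.range radar_output.length).all (fun i =>
    if ((PySem.Str.split? (radar_output.getD i "") "|").getD []).length > 1 ∧
        ((PySem.Str.split? (radar_output.getD i "") "|").getD []).headD "" = "No. of Repeats" then
      decide (i + 1 < radar_output.length) &&
      (PySem.Int.ofStr? (((PySem.Str.split? (radar_output.getD (i + 1) "") "|").getD []).headD "")).isSome &&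
      (if 0 < ((PySem.Int.ofStr? (((PySem.Str.split? (radar_output.getD (i + 1) "") "|").getD []).headD "")).getD 0).toNat then
        decide (i + 3 + ((PySem.Int.ofStr? (((PySem.Str.split? (radar_output.getD (i + 1) "") "|").getD []).headD "")).getD 0).toNat ≤ radar_output.length) &&
        ((List.range (((PySem.Str.split? (radar_output.getD (i + 3 + 0) "") "\t").getD []).getLastD "").toList.length).all (fun k =>
          if (((PySem.Str.split? (radar_output.getD (i + 3 + 0) "") "\t").getD []).getLastD "").toList.getD k ' ' ∈ (['D', 'E', 'T', 'S', 'K'] : List Char) then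
            (List.range ((PySem.Int.ofStr? (((PySem.Str.split? (radar_output.getD (i + 1) "") "|").getD []).headD "")).getD 0).toNat).all
              (fun j => decide (k < (((PySem.Str.split? (radar_output.getD (i + 3 + j) "") "\t").getD []).getLastD "").toList.length))
          else true))
      else true)
    else true)) = true

instance (radar_output : List String) : Decidable (Pre_parse_radar_output radar_output) := by
  unfold Pre_parse_radar_output; infer_instance

def pvWitness_parse_radar_output : List String :=
  ["No. of Repeats|x", "2|", "----", "a\tDAD", "b\tDAD", "tail"]

def Spec_parse_radar_output (radar_output : List String) (out : Int) : Prop := out = parse_radar_output_alt radar_output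
instance (radar_output : List String) (out : Int) : Decidable (Spec_parse_radar_output radar_output out) := by unfold Spec_parse_radar_output; infer_instance

-- ===== CLAIM (what is proved, stated in full; the proofs are below) =====
def Claim_equal_parse_radar_output : Prop := ∀ (radar_output : List String), Dom_parse_radar_output radar_output → Pre_parse_radar_output radar_output → Spec_parse_radar_output radar_output (parse_radar_output radar_output)

-- ===== LEMMAS AND PROOFS =====

theorem pv_sum_eq_length {l : List ℚ} (hle : ∀ q ∈ l, q ≤ 1) :
    (l.sum = (l.length : ℚ)) ↔ ∀ q ∈ l, q = 1 := by
  induction l with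
  | nil => simp
  | cons x t ih =>
    have hx : x ≤ 1 := hle x (List.mem_cons_self ..)
    have ht : ∀ q ∈ t, q ≤ 1 := fun q hq => hle q (List.mem_cons_of_mem _ hq)
    have hts : t.sum ≤ (t.length : ℚ) := by
      clear ih hle hx
      induction t with
      | nil => simp
      | cons y u ihu =>
        have hy := ht y (List.mem_cons_self ..)
        have hu := ihu (fun q hq => ht q (List.mem_cons_of_mem _ hq))
        simp only [List.sum_cons, List.length_cons]
        push_cast
        linarith
    constructor
    · intro h
      simp only [List.sum_cons, List.length_cons] at h
      push_cast at h
      have hx1 : x = 1 := by linarith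
      have htt : t.sum = (t.length : ℚ) := by linarith
      intro q hq
      rcases List.mem_cons.mp hq with rfl | hq
      · exact hx1
      · exact (ih ht).mp htt q hq
    · intro h
      simp only [List.sum_cons, List.length_cons]
      rw [h x (List.mem_cons_self ..), (ih ht).mpr fun q hq => h q (List.mem_cons_of_mem _ hq)]
      push_cast; ring

theorem pv_gms_le_one (a b : Char) : pvGetMatchScore a b ≤ 1 := by
  unfold pvGetMatchScore; split_ifs <;> norm_num

theorem pv_gms_eq_one_iff (a b : Char) : pvGetMatchScore a b = 1 ↔ a = b := by
  unfold pvGetMatchScore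
  split_ifs with h1 h2
  · simp [h1]
  · rw [iff_false_intro h1]; norm_num
  · rw [iff_false_intro h1]; norm_num

theorem pv_fields_eq (s : String) : pvBarFields s = pvSplitA s "|" := rfl

theorem pv_lastTab_eq (s : String) : pvLastTabField s = (pvSplitA s "\t").getLastD "" := rfl

theorem pv_foldl_add_q (l : List String) (g : String → ℚ) (a : ℚ) :
    l.foldl (fun acc r => acc + g r) a = a + (l.map g).sum := by
  induction l generalizing a with
  | nil => simp
  | cons x t ih => rw [List.foldl_cons, ih, List.map_cons, List.sum_cons]; ring

-- the column-safety shape Pre_ provides for one block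
def pvSafe (repeats : List String) : Prop :=
  ∀ k < ((PySem.List.pyGet? repeats 0).getD "").toList.length,
    ((PySem.List.pyGet? repeats 0).getD "").toList.getD k ' ' ∈ (['D', 'E', 'T', 'S', 'K'] : List Char) →
    ∀ r ∈ repeats, k < r.toList.length

-- B's iterated intersection is the filter by "all repeats agree"
theorem pv_fold_filter (rs : List String) (p : String → Int → Bool) (l0 : List Int)
    (h0 : l0.Nodup) :
    rs.foldl (fun (h : PySem.Set Int) r => PySem.Set.ofList (h.filter (p r))) l0
      = l0.filter (fun i => rs.all (fun r => p r i)) := by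
  induction rs generalizing l0 with
  | nil => simp
  | cons r t ih =>
    rw [List.foldl_cons, PySem.Set.ofList_eq_self_of_nodup _ (List.Nodup.filter _ h0),
      ih _ (List.Nodup.filter _ h0), List.filter_filter]
    simp [List.all_cons, Bool.and_comm]

theorem pv_score_eq (repeats : List String) (hs : pvSafe repeats) :
    pvGetRepeatScore repeats = pvBlockScore repeats := by
  unfold pvGetRepeatScore pvBlockScore
  set first := (PySem.List.pyGet? repeats 0).getD "" with hfirst
  -- A's loop counts the columns with a full-count similarity sum
  rw [show (fun (score : Int) (i : Nat) =>
      if (PySem.Str.pyGet? first (i : Int)).getD ' ' ∉ (['D', 'E', 'T', 'S', 'K'] : List Char) then score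
      else if repeats.foldl (fun acc r => acc + pvGetMatchScore
              ((PySem.Str.pyGet? first (i : Int)).getD ' ')
              ((PySem.Str.pyGet? r (i : Int)).getD ' ')) (0 : ℚ) = (repeats.length : ℚ)
           then score + 1 else score)
    = (fun (score : Int) (i : Nat) =>
      if ((PySem.Str.pyGet? first (i : Int)).getD ' ' ∈ (['D', 'E', 'T', 'S', 'K'] : List Char)) ∧
          repeats.foldl (fun acc r => acc + pvGetMatchScore
              ((PySem.Str.pyGet? first (i : Int)).getD ' ')
              ((PySem.Str.pyGet? r (i : Int)).getD ' ')) (0 : ℚ) = (repeats.length : ℚ)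
        then score + 1 else score) from by
    funext score i
    by_cases h1 : (PySem.Str.pyGet? first (i : Int)).getD ' ' ∈ (['D', 'E', 'T', 'S', 'K'] : List Char)
    · rw [if_neg (not_not_intro h1)]
      by_cases h2 : repeats.foldl (fun acc r => acc + pvGetMatchScore
              ((PySem.Str.pyGet? first (i : Int)).getD ' ')
              ((PySem.Str.pyGet? r (i : Int)).getD ' ')) (0 : ℚ) = (repeats.length : ℚ)
      · rw [if_pos h2, if_pos ⟨h1, h2⟩]
      · rw [if_neg h2, if_neg (fun hc => h2 hc.2)]
    · rw [if_pos h1, if_neg (fun hc => h1 hc.1)]]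
  rw [PySem.List.foldl_ite_add_one, zero_add]
  -- B's fold of intersections
  rw [PySem.Str.len_eq, PySem.List.pyRange_zero_nat]
  rw [List.filter_map]
  have hinj : Function.Injective (fun k : Nat => (k : Int)) := fun a b h => by simpa using h
  rw [PySem.Set.ofList_eq_self_of_nodup _ (List.Nodup.map hinj (List.Nodup.filter _ List.nodup_range)),
    pv_fold_filter _ _ _ (List.Nodup.map hinj (List.Nodup.filter _ List.nodup_range)),
    List.filter_map, List.length_map, List.filter_filter]
  rw [List.countP_eq_length_filter]
  congr 1
  refine congrArg List.length (List.filter_congr ?_)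
  intro k hk
  rw [List.mem_range] at hk
  have hchar : (PySem.Str.pyGet? first (k : Int)).getD ' ' = first.toList.getD k ' ' := by
    rw [PySem.Str.pyGet?_natCast, List.getD_eq_getElem?_getD]
  simp only [Function.comp_apply]
  rw [Bool.eq_iff_iff]
  simp only [Bool.and_eq_true, decide_eq_true_eq]
  by_cases hc : (PySem.Str.pyGet? first (k : Int)).getD ' ' ∈ (['D', 'E', 'T', 'S', 'K'] : List Char)
  · have hr : ∀ r ∈ repeats, k < r.toList.length := by
      rw [hchar] at hc
      exact hs k hk hc
    have hiff : (repeats.foldl (fun acc r => acc + pvGetMatchScore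
            ((PySem.Str.pyGet? first (k : Int)).getD ' ')
            ((PySem.Str.pyGet? r (k : Int)).getD ' ')) (0 : ℚ) = (repeats.length : ℚ))
        ↔ (repeats.all (fun r => (PySem.Str.pyGet? r (k : Int)).getD '\x00'
            == (PySem.Str.pyGet? first (k : Int)).getD ' ') = true) := by
      rw [pv_foldl_add_q, zero_add]
      rw [show ((repeats.length : Nat) : ℚ)
          = (((repeats.map (fun r => pvGetMatchScore
              ((PySem.Str.pyGet? first (k : Int)).getD ' ')
              ((PySem.Str.pyGet? r (k : Int)).getD ' '))).length : Nat) : ℚ) from by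
        rw [List.length_map]]
      rw [pv_sum_eq_length (by
        intro q hq
        rcases List.mem_map.mp hq with ⟨r, _, rfl⟩
        exact pv_gms_le_one _ _)]
      rw [List.forall_mem_map, List.all_eq_true]
      constructor
      · intro h r hrm
        have h1 := (pv_gms_eq_one_iff _ _).mp (h r hrm)
        have hget : PySem.Str.pyGet? r (k : Int) = some (r.toList[k]'(hr r hrm)) := by
          rw [PySem.Str.pyGet?_natCast, List.getElem?_eq_getElem (hr r hrm)]
        rw [hget] at h1 ⊢
        rw [Option.getD_some] at h1 ⊢
        rw [beq_iff_eq, ← h1]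
      · intro h r hrm
        have h1 := h r hrm
        have hget : PySem.Str.pyGet? r (k : Int) = some (r.toList[k]'(hr r hrm)) := by
          rw [PySem.Str.pyGet?_natCast, List.getElem?_eq_getElem (hr r hrm)]
        rw [hget] at h1 ⊢
        rw [Option.getD_some] at h1 ⊢
        rw [beq_iff_eq] at h1
        rw [pv_gms_eq_one_iff, h1]
    constructor
    · rintro ⟨h1, h2⟩
      exact ⟨hiff.mp h2, hc⟩
    · rintro ⟨h1, h2⟩
      exact ⟨hc, hiff.mpr h1⟩
  · constructor
    · rintro ⟨h1, _⟩
      exact absurd h1 hc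
    · rintro ⟨_, h2⟩
      exact absurd h2 hc

theorem pv_loopA_eq (radar : List String) (hp : Pre_parse_radar_output radar) :
    ∀ d i score, radar.length - i ≤ d →
      pvLoopA radar score i d =
        (pvBlocks radar i d).foldl (fun s b => max s (pvBlockScore b)) score := by
  intro d
  induction d with
  | zero =>
    intro i score hd
    rfl
  | succ d ih =>
    intro i score hd
    rw [pvLoopA, pvBlocks]
    by_cases hi : i < radar.length
    · rw [if_pos hi, if_pos hi]
      simp only [pv_fields_eq, pv_lastTab_eq]
      by_cases h1 : (pvSplitA (radar.getD i "") "|").length > 1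
      · by_cases h2 : (pvSplitA (radar.getD i "") "|").headD "" = "No. of Repeats"
        · rw [if_pos h1, if_pos h2, if_pos (And.intro h1 h2)]
          have hall := List.all_eq_true.mp hp i (List.mem_range.mpr hi)
          rw [if_pos (And.intro
            (show ((PySem.Str.split? (radar.getD i "") "|").getD []).length > 1 from h1)
            (show ((PySem.Str.split? (radar.getD i "") "|").getD []).headD "" = "No. of Repeats" from h2))] at hall
          set n := ((PySem.Int.ofStr? ((pvSplitA (radar.getD (i + 1) "") "|").headD "")).getD 0).toNat with hn
          set reps := (List.range n).map
            (fun ridx => (pvSplitA (radar.getD (i + 3 + ridx) "") "\t").getLastD "") with hreps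
          have hrepsne : reps.length = n := by rw [hreps, List.length_map, List.length_range]
          by_cases hn0 : 0 < n
          · rw [if_pos (show 0 < ((PySem.Int.ofStr? (((PySem.Str.split? (radar.getD (i + 1) "") "|").getD []).headD "")).getD 0).toNat from hn0)] at hall
            simp only [Bool.and_eq_true] at hall
            obtain ⟨-, -, hallK⟩ := hall
            have hsafe : ∀ k < (((PySem.Str.split? (radar.getD (i + 3 + 0) "") "\t").getD []).getLastD "").toList.length,
                (((PySem.Str.split? (radar.getD (i + 3 + 0) "") "\t").getD []).getLastD "").toList.getD k ' ' ∈ (['D', 'E', 'T', 'S', 'K'] : List Char) →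
                ∀ j < ((PySem.Int.ofStr? (((PySem.Str.split? (radar.getD (i + 1) "") "|").getD []).headD "")).getD 0).toNat, k < (((PySem.Str.split? (radar.getD (i + 3 + j) "") "\t").getD []).getLastD "").toList.length := by
              intro k hk hkc j hj
              have h3 := List.all_eq_true.mp hallK k (List.mem_range.mpr hk)
              rw [if_pos hkc] at h3
              have h4 := List.all_eq_true.mp h3 j (List.mem_range.mpr hj)
              exact of_decide_eq_true h4
            have hhead : (PySem.List.pyGet? reps 0).getD ""
                = (pvSplitA (radar.getD (i + 3 + 0) "") "\t").getLastD "" := by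
              rw [PySem.List.pyGet?_zero, hreps, List.getElem?_map, List.getElem?_range hn0]
              rfl
            have hsafe' : pvSafe reps := by
              intro k hk hkc r hrm
              rcases List.mem_map.mp hrm with ⟨j, hj, rfl⟩
              rw [List.mem_range] at hj
              rw [hhead] at hk hkc
              exact hsafe k hk hkc j hj
            have hne : reps.isEmpty = false := by
              rw [Bool.eq_false_iff]
              intro hemp
              rw [List.isEmpty_iff] at hemp
              rw [hemp] at hrepsne
              simp at hrepsne
              omega
            rw [hne]
            rw [if_neg (by simp : ¬(false = true))]
            rw [List.singleton_append, List.foldl_cons]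
            rw [if_pos (by rw [hrepsne]; exact hn0)]
            rw [pv_score_eq reps hsafe']
            rw [show i + 3 + n + 1 = i + 4 + n from by omega]
            exact ih (i + 4 + n) _ (by omega)
          · have hn0' : n = 0 := by omega
            have hrepsnil : reps = [] := by rw [hreps, hn0']; rfl
            rw [hrepsnil, hn0']
            rw [if_neg (by simp : ¬(([] : List String).length > 0))]
            rw [if_pos (by simp : (([] : List String).isEmpty) = true)]
            rw [List.nil_append]
            rw [show i + 3 + 0 + 1 = i + 4 + 0 from by omega]
            exact ih (i + 4 + 0) score (by omega)
        · rw [if_pos h1, if_neg h2, if_neg (fun hc => h2 hc.2)]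
          exact ih (i + 1) score (by omega)
      · rw [if_neg h1, if_neg (fun hc => h1 hc.1)]
        exact ih (i + 1) score (by omega)
    · rw [if_neg hi, if_neg hi]
      rfl

theorem pv_blockScore_nonneg (b : List String) : 0 ≤ pvBlockScore b := by
  unfold pvBlockScore
  positivity

theorem pv_fold_max_eq_maxD (l : List Int) (hl : ∀ x ∈ l, 0 ≤ x) :
    l.foldl (fun s x => max s x) 0 = PySem.List.maxD l (fun x => x) 0 := by
  cases l with
  | nil => rfl
  | cons x t =>
    unfold PySem.List.maxD
    rw [PySem.List.max?_id_cons, Option.getD_some, List.foldl_cons]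
    have h0 : max 0 x = x := max_eq_right (hl x (List.mem_cons_self ..))
    rw [h0]

-- ===== VERDICT (by name: the statement is the Claim_ definition above) =====
theorem parse_radar_output_spec : Claim_equal_parse_radar_output := by
  intro radar _hd hp
  unfold Spec_parse_radar_output parse_radar_output parse_radar_output_alt
  rw [pv_loopA_eq radar hp radar.length 0 0 (by omega)]
  rw [show (pvBlocks radar 0 radar.length).foldl (fun s b => max s (pvBlockScore b)) 0
      = ((pvBlocks radar 0 radar.length).map pvBlockScore).foldl (fun s x => max s x) 0 from
    (List.foldl_map).symm]
  apply pv_fold_max_eq_maxD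
  intro x hx
  rcases List.mem_map.mp hx with ⟨b, _, rfl⟩
  exact pv_blockScore_nonneg b
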